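-- pv_equiv track=rewrite | github.com/HYwooo/hypurr-monitor | scripts/train_dynamic_thresh.py | generate_train_months
-- ===== SOURCE A (Python) =====
-- def generate_train_months(n_months):
--     """Generate n months immediately before 202509"""
--     months = []
--     # 202509 = September 2025
--     year, month = 2025, 9
--     for _ in range(n_months):
--         months.append(year * 100 + month)
--         if month == 1:
--             year, month = year - 1, 12
--         else:
--             month -= 1
--     return sorted(months)
-- ===== SOURCE B (Python) =====
-- def generate_train_months(n_months):
--     """Generate n months immediately before 202509"""
--     idx = 2025 * 12 + 8  # absolute month index of September 2025
--     out = []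
--     for i in range(n_months):
--         y, m0 = divmod(idx - (n_months - 1) + i, 12)
--         out.append(y * 100 + m0 + 1)
--     return out
-- ===== Notes on version B (the rewrite author's own statement) =====
-- stated objective: simpler
-- what changed: Replaces the count-down loop with conditional year/month rollover plus a final sort by a closed-form absolute-month-index computation (divmod by 12) that emits the window already in ascending order, so no sort is needed.
import Mathlib
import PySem

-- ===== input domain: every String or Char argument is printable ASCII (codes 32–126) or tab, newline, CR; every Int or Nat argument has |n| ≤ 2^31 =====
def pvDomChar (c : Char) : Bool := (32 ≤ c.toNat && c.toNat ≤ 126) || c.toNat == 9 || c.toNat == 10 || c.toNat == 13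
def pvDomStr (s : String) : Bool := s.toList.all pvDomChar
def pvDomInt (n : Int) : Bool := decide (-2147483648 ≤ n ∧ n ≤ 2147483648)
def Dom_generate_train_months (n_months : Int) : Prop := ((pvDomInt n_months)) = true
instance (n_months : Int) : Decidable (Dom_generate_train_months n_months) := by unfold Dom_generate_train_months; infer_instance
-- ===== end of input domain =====

-- B replaces A's count-down loop + final sort with a closed-form divmod-by-12
-- computation that emits the months already in ascending order (objective: simpler).

-- ===== PORT A =====
def generate_train_months (n_months : Int) : List Int :=
  let st := (PySem.List.pyRange 0 n_months 1).foldl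
    (fun (st : List Int × Int × Int) _ =>
      let months := st.1 ++ [st.2.1 * 100 + st.2.2]
      if st.2.2 == 1 then (months, st.2.1 - 1, 12) else (months, st.2.1, st.2.2 - 1))
    ([], 2025, 9)
  PySem.List.sorted st.1 (fun x => x) false

-- ===== PORT B =====
def generate_train_months_alt (n_months : Int) : List Int :=
  let idx : Int := 2025 * 12 + 8
  (PySem.List.pyRange 0 n_months 1).foldl
    (fun out i =>
      let y := PySem.Int.floordiv (idx - (n_months - 1) + i) 12
      let m0 := PySem.Int.mod (idx - (n_months - 1) + i) 12
      out ++ [y * 100 + m0 + 1]) []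

-- ===== PRECONDITION & SPEC =====
def Spec_generate_train_months (n_months : Int) (out : List Int) : Prop := out = generate_train_months_alt n_months
instance (n_months : Int) (out : List Int) : Decidable (Spec_generate_train_months n_months out) := by unfold Spec_generate_train_months; infer_instance

-- ===== CLAIM (what is proved, stated in full; the proofs are below) =====
def Claim_equal_generate_train_months : Prop := ∀ (n_months : Int), Dom_generate_train_months n_months → Spec_generate_train_months n_months (generate_train_months n_months)

-- ===== LEMMAS AND PROOFS =====

-- encoding of an absolute month index m as yyyymm
def pvEnc (m : Int) : Int := PySem.Int.floordiv m 12 * 100 + PySem.Int.mod m 12 + 1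

-- A's loop step
def pvStep (st : List Int × Int × Int) : List Int × Int × Int :=
  let months := st.1 ++ [st.2.1 * 100 + st.2.2]
  if st.2.2 == 1 then (months, st.2.1 - 1, 12) else (months, st.2.1, st.2.2 - 1)

theorem pvEnc_eq (m : Int) : pvEnc m = m / 12 * 100 + m % 12 + 1 := by
  simp [pvEnc]

theorem pvEnc_strictMono {a b : Int} (h : a < b) : pvEnc a < pvEnc b := by
  rw [pvEnc_eq, pvEnc_eq]; omega

theorem pvEnc_of_ym (y mo : Int) (h1 : 1 ≤ mo) (h2 : mo ≤ 12) :
    pvEnc (y * 12 + (mo - 1)) = y * 100 + mo := by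
  rw [pvEnc_eq]
  have hq : (y * 12 + (mo - 1)) / 12 = y := by omega
  have hr : (y * 12 + (mo - 1)) % 12 = mo - 1 := by omega
  rw [hq, hr]; ring

-- a foldl that ignores the list elements is an iterate of length-many steps
theorem pvFoldl_const {α σ : Type} (h : σ → σ) (l : List α) (init : σ) :
    l.foldl (fun s _ => h s) init = h^[l.length] init := by
  induction l generalizing init with
  | nil => rfl
  | cons x xs ih =>
      simp only [List.foldl_cons, List.length_cons, ih, Function.iterate_succ_apply]

-- characterisation of A's loop: months collected are descending encodings
theorem pvLoopA (k : Nat) : ∀ (acc : List Int) (y mo : Int), 1 ≤ mo → mo ≤ 12 →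
    (pvStep^[k] (acc, y, mo)).1
    = acc ++ (List.range k).map (fun j : Nat => pvEnc (y * 12 + (mo - 1) - (j : Int))) := by
  induction k with
  | zero => intro acc y mo _ _; simp
  | succ k ih =>
      intro acc y mo h1 h2
      rw [Function.iterate_succ_apply, List.range_succ_eq_map, List.map_cons, List.map_map]
      by_cases hmo : mo = 1
      · subst hmo
        have hstep : pvStep (acc, (y, 1)) = (acc ++ [y * 100 + 1], y - 1, 12) := by
          simp [pvStep]
        rw [hstep, ih (acc ++ [y * 100 + 1]) (y - 1) 12 (by norm_num) (by norm_num)]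
        have h0 : pvEnc (y * 12 + (1 - 1) - ((0 : Nat) : Int)) = y * 100 + 1 := by
          rw [show (y * 12 + (1 - 1) - ((0 : Nat) : Int)) = y * 12 + (1 - 1) by push_cast; ring]
          exact pvEnc_of_ym y 1 (by norm_num) (by norm_num)
        rw [List.append_assoc, List.singleton_append]
        congr 1
        rw [h0]
        congr 1
        apply List.map_congr_left; intro j _
        simp only [Function.comp]
        congr 1; push_cast; ring
      · have hstep : pvStep (acc, (y, mo)) = (acc ++ [y * 100 + mo], y, mo - 1) := by
          simp [pvStep, hmo]
        rw [hstep, ih (acc ++ [y * 100 + mo]) y (mo - 1) (by omega) (by omega)]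
        have h0 : pvEnc (y * 12 + (mo - 1) - ((0 : Nat) : Int)) = y * 100 + mo := by
          rw [show (y * 12 + (mo - 1) - ((0 : Nat) : Int)) = y * 12 + (mo - 1) by push_cast; ring]
          exact pvEnc_of_ym y mo h1 h2
        rw [List.append_assoc, List.singleton_append]
        congr 1
        rw [h0]
        congr 1
        apply List.map_congr_left; intro j _
        simp only [Function.comp]
        congr 1; push_cast; ring


-- ===== VERDICT (by name: the statement is the Claim_ definition above) =====
theorem generate_train_months_spec : Claim_equal_generate_train_months := by
  intro n _
  unfold Spec_generate_train_months generate_train_months generate_train_months_alt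
  set idx : Int := 2025 * 12 + 8 with hidx
  set k := n.toNat with hk
  -- B's side: foldl-append is a map
  have hfoldmap : ∀ (f : Int → Int) (l : List Int) (init : List Int),
      l.foldl (fun out i => out ++ [f i]) init = init ++ l.map f := by
    intro f l
    induction l with
    | nil => simp
    | cons x xs ih => intro init; simp [ih]
  have hrange : PySem.List.pyRange 0 n 1 = (List.range k).map (fun j : Nat => (j : Int)) := by
    rw [PySem.List.pyRange_one]
    have h0 : (n - 0).toNat = k := by omega
    rw [h0]
    simp
  -- A's raw list
  have hA : ((PySem.List.pyRange 0 n 1).foldl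
      (fun (st : List Int × Int × Int) _ =>
        let months := st.1 ++ [st.2.1 * 100 + st.2.2]
        if st.2.2 == 1 then (months, st.2.1 - 1, 12) else (months, st.2.1, st.2.2 - 1))
      (([] : List Int), 2025, 9)).1
      = (List.range k).map (fun j : Nat => pvEnc (idx - (j : Int))) := by
    have hfn : (fun (st : List Int × Int × Int) (_ : Int) =>
        let months := st.1 ++ [st.2.1 * 100 + st.2.2]
        if st.2.2 == 1 then (months, st.2.1 - 1, 12) else (months, st.2.1, st.2.2 - 1))
        = fun st _ => pvStep st := rfl
    rw [hfn, pvFoldl_const pvStep, PySem.List.length_pyRange_one]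
    have hlen : (n - 0).toNat = k := by omega
    rw [hlen, pvLoopA k [] 2025 9 (by norm_num) (by norm_num)]
    simp only [List.nil_append]
    apply List.map_congr_left; intro j _
    rw [hidx]
    norm_num
  -- B's list
  have hB : (PySem.List.pyRange 0 n 1).foldl
      (fun out i => out ++ [PySem.Int.floordiv (idx - (n - 1) + i) 12 * 100
        + PySem.Int.mod (idx - (n - 1) + i) 12 + 1]) []
      = (List.range k).map (fun j : Nat => pvEnc (idx - (n - 1) + (j : Int))) := by
    have hinst := hfoldmap (fun i => pvEnc (idx - (n - 1) + i)) (PySem.List.pyRange 0 n 1) []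
    simp only [pvEnc] at hinst
    rw [hinst, hrange, List.map_map, List.nil_append]
    apply List.map_congr_left; intro j _
    simp [pvEnc, Function.comp]
  -- B's list is the reverse of A's raw list
  have hrevlist : (List.range k).map (fun j : Nat => pvEnc (idx - (n - 1) + (j : Int)))
      = ((List.range k).map (fun j : Nat => pvEnc (idx - (j : Int)))).reverse := by
    apply List.ext_getElem
    · simp
    · intro i h1 h2
      simp only [List.length_map, List.length_range] at h1
      simp only [List.getElem_map, List.getElem_range, List.getElem_reverse,
        List.length_map, List.length_range]
      have hn : (0:Int) < n := by
        rcases Int.lt_or_le 0 n with h | h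
        · exact h
        · exfalso; omega
      congr 1
      have hcast : ((k - 1 - i : Nat) : Int) = (k : Int) - 1 - i := by omega
      rw [hcast]
      omega
  simp only []
  rw [hA, hB, hrevlist]
  -- sorted of the (strictly descending) raw list is its reverse
  apply PySem.List.sorted_eq_of_perm_of_pairwise_lt
  · exact List.reverse_perm _
  · rw [List.pairwise_reverse, List.pairwise_map]
    refine List.Pairwise.imp ?_ (List.pairwise_lt_range)
    intro a b hab
    exact pvEnc_strictMono (by omega)
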